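-- pv_equiv track=rewrite | github.com/phaquinosilva/ACxML | comparators/python/larger_comparators.py | n_edc
-- ===== SOURCE A (Python) =====
-- def n_edc(a, b, n):
--     # formatting stuff
--     a = format(a, '#0%db' % (n+2))[:1:-1]
--     b = format(b, '#0%db' % (n+2))[:1:-1]
--     a = list(map(int, a))
--     b = list(map(int, b))
--     # compute xnors
--     eq = [0]*n
--     for i in range(1,n):
--         eq[i] = ~(a[i] ^ b[i])
--     # compute greater for each bit
--     g = [0]*n
--     for i in range(n):
--         temp = 1
--         for k in range(i+1, n):
--             temp &= eq[k]
--         g[i] = temp & a[i] & ~b[i]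
--     # compute final comparison
--     greater = 0
--     for i in range(n):
--         greater |= g[i]
--     return greater&1 == 1
-- ===== SOURCE B (Python) =====
-- def n_edc(a, b, n):
--     # Compare the low n bits of a and b arithmetically: a > b on n-bit values
--     # is exactly (a mod 2**n) > (b mod 2**n).  No bit lists, no nested loops.
--     if n <= 0:
--         return False
--     m = 1 << n
--     return a % m > b % m
-- ===== Notes on version B (the rewrite author's own statement) =====
-- stated objective: faster
-- what changed: replaces the per-bit string formatting, XNOR table and quadratic suffix-AND scan by the closed-form comparison (a mod 2^n) > (b mod 2^n) via one shift and two modulos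
import Mathlib
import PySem

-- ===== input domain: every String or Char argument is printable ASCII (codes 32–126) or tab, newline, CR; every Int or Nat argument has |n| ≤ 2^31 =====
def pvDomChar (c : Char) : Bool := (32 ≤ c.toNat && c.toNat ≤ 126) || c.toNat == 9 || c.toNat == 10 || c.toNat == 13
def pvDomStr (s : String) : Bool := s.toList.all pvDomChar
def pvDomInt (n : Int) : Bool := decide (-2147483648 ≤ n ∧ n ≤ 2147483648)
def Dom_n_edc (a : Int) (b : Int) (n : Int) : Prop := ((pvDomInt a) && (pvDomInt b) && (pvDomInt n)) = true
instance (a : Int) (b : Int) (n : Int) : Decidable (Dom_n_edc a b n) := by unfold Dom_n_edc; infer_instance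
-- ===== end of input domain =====

-- B replaces A's bit-list construction and quadratic suffix-AND scan by the closed form
-- (a mod 2^n) > (b mod 2^n); equivalence proved for a,b ≥ 0, n ≥ -2 (elsewhere A raises).


-- ===== PORT A =====

-- binary digits of a Nat, MSB-first, [] for 0 (hand port of the digit part of format(x,'b'); exact)
def pvBinCore (m : Nat) : List Char :=
  if m = 0 then [] else pvBinCore (m / 2) ++ [if m % 2 = 1 then '1' else '0']
decreasing_by exact Nat.div_lt_self (Nat.pos_of_ne_zero (by assumption)) (by decide)

-- format(x, '#0{w}b')[:1:-1] followed by list(map(int, ·)), exact for x ≥ 0 (Pre_):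
-- the formatted string is '0'::'b'::(zero padding ++ digits); s[:1:-1] is the reverse of s.drop 2;
-- every remaining char is '0' or '1', on which int(c) is the map below.
def pvFormatBits (x : Int) (w : Int) : List Int :=
  let ds : List Char := if x.toNat = 0 then ['0'] else pvBinCore x.toNat
  ((List.replicate (w - 2 - ds.length).toNat '0' ++ ds).reverse).map
    (fun c => if c = '1' then (1 : Int) else 0)

def n_edc (a : Int) (b : Int) (n : Int) : Bool :=
  let la := pvFormatBits a (n + 2)
  let lb := pvFormatBits b (n + 2)
  -- eq = [0]*n; for i in range(1,n): eq[i] = ~(a[i]^b[i])   (indices are in range under Pre_)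
  let eq := (PySem.List.pyRange 1 n 1).foldl
    (fun e i => e.set i.toNat (Int.not (PySem.Int.bxor (la.getD i.toNat 0) (lb.getD i.toNat 0))))
    (List.replicate n.toNat 0)
  -- g = [0]*n; for i in range(n): temp = 1; for k in range(i+1,n): temp &= eq[k]; g[i] = temp & a[i] & ~b[i]
  let g := (PySem.List.pyRange 0 n 1).foldl
    (fun g2 i =>
      let temp := (PySem.List.pyRange (i + 1) n 1).foldl
        (fun t k => PySem.Int.band t (eq.getD k.toNat 0)) 1
      g2.set i.toNat (PySem.Int.band (PySem.Int.band temp (la.getD i.toNat 0))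
        (Int.not (lb.getD i.toNat 0))))
    (List.replicate n.toNat 0)
  -- greater = 0; for i in range(n): greater |= g[i]
  let greater := (PySem.List.pyRange 0 n 1).foldl
    (fun gr i => PySem.Int.bor gr (g.getD i.toNat 0)) 0
  PySem.Int.band greater 1 == 1

-- ===== PORT B =====
def n_edc_alt (a : Int) (b : Int) (n : Int) : Bool :=
  if n ≤ 0 then false
  else
    let m : Int := 1 <<< n.toNat
    decide (PySem.Int.mod b m < PySem.Int.mod a m)

-- ===== PRECONDITION & SPEC =====
-- Pre_ excludes exactly the inputs where A raises ValueError: negative a or b (int() hits the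
-- '-'/'b' characters of the formatted string) and n < -2 (invalid format specifier '#0{n+2}b').
def Pre_n_edc (a : Int) (b : Int) (n : Int) : Prop := 0 ≤ a ∧ 0 ≤ b ∧ -2 ≤ n
instance (a : Int) (b : Int) (n : Int) : Decidable (Pre_n_edc a b n) := by
  unfold Pre_n_edc; infer_instance

def pvWitness_n_edc : Int × Int × Int := (5, 3, 3)

def Spec_n_edc (a : Int) (b : Int) (n : Int) (out : Bool) : Prop := out = n_edc_alt a b n
instance (a : Int) (b : Int) (n : Int) (out : Bool) : Decidable (Spec_n_edc a b n out) := by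
  unfold Spec_n_edc; infer_instance

-- ===== CLAIM (what is proved, stated in full; the proofs are below) =====
def Claim_equal_n_edc : Prop := ∀ (a : Int) (b : Int) (n : Int),
  Dom_n_edc a b n → Pre_n_edc a b n → Spec_n_edc a b n (n_edc a b n)

-- ===== LEMMAS AND PROOFS =====

-- bit j of x
def pvBit (x : Nat) (j : Nat) : Nat := x / 2 ^ j % 2

lemma pvBit_lt_two (x j : Nat) : pvBit x j < 2 := Nat.mod_lt _ (by decide)

lemma pvGetD_append_zeros (xs : List Int) (p i : Nat) :
    (xs ++ List.replicate p (0 : Int)).getD i 0 = xs.getD i 0 := by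
  induction xs generalizing i with
  | nil => simp
  | cons x xs ih =>
    cases i with
    | zero => simp
    | succ i => simpa using ih i

lemma pvBinCore_getD (m : Nat) (i : Nat) :
    (((pvBinCore m).reverse).map (fun c => if c = '1' then (1 : Int) else 0)).getD i 0
      = (pvBit m i : Int) := by
  induction m using Nat.strong_induction_on generalizing i with
  | _ m ih =>
    by_cases h0 : m = 0
    · subst h0; simp [pvBinCore, pvBit]
    · rw [pvBinCore, if_neg h0, List.reverse_append]
      simp only [List.reverse_singleton, List.singleton_append, List.map_cons]
      cases i with
      | zero =>
        have h2 : m % 2 = 0 ∨ m % 2 = 1 := Nat.mod_two_eq_zero_or_one m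
        unfold pvBit
        rcases h2 with h | h <;> simp [h]
      | succ i =>
        rw [List.getD_cons_succ,
          ih (m / 2) (Nat.div_lt_self (Nat.pos_of_ne_zero h0) (by decide)) i]
        unfold pvBit
        rw [Nat.div_div_eq_div_mul, pow_succ']

lemma pvFormatBits_getD (x w : Int) (i : Nat) :
    (pvFormatBits x w).getD i 0 = (pvBit x.toNat i : Int) := by
  unfold pvFormatBits
  by_cases h0 : x.toNat = 0
  · have hb : pvBit x.toNat i = 0 := by rw [h0]; unfold pvBit; simp
    rw [hb]
    simp only [h0, reduceIte, List.reverse_append, List.reverse_replicate,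
      List.reverse_singleton, List.singleton_append, List.map_cons, List.map_replicate]
    have h01 : (if '0' = '1' then (1 : Int) else 0) = 0 := by decide
    rw [h01]
    cases i with
    | zero => simp
    | succ i =>
      rw [List.getD_cons_succ]
      simp
  · simp only [if_neg h0]
    rw [List.reverse_append, List.reverse_replicate, List.map_append, List.map_replicate]
    have h01 : (if '0' = '1' then (1 : Int) else 0) = 0 := by decide
    rw [h01, pvGetD_append_zeros]
    exact pvBinCore_getD x.toNat i

lemma pvFoldlSet_getD (idxs : List Int) (f : Int → Int) (l : List Int) (j : Nat)
    (hidx : ∀ i ∈ idxs, 0 ≤ i) :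
    (idxs.foldl (fun e i => e.set i.toNat (f i)) l).getD j 0 =
      if ((j : Int) ∈ idxs ∧ j < l.length) then f (j : Int) else l.getD j 0 := by
  induction idxs generalizing l with
  | nil => simp
  | cons i idxs ih =>
    have hi : 0 ≤ i := hidx i (by simp)
    rw [List.foldl_cons, ih _ (fun k hk => hidx k (by simp [hk])), List.length_set]
    by_cases hjl : j < l.length
    · by_cases hji : (j : Int) = i
      · subst hji
        by_cases hmem : (j : Int) ∈ idxs
        · rw [if_pos ⟨hmem, hjl⟩, if_pos ⟨by simp, hjl⟩]
        · rw [if_neg (by tauto), if_pos ⟨by simp, hjl⟩,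
            (by omega : ((j : Int)).toNat = j), List.getD_eq_getElem?_getD,
            List.getElem?_set_self (by omega), Option.getD_some]
      · have hne : i.toNat ≠ j := by omega
        have hset : (l.set i.toNat (f i)).getD j 0 = l.getD j 0 := by
          rw [List.getD_eq_getElem?_getD, List.getD_eq_getElem?_getD,
            List.getElem?_set_ne hne]
        by_cases hmem : (j : Int) ∈ idxs
        · rw [if_pos ⟨hmem, hjl⟩, if_pos ⟨List.mem_cons_of_mem _ hmem, hjl⟩]
        · rw [if_neg (by tauto), hset, if_neg (by
            intro h
            rcases List.mem_cons.mp h.1 with h' | h'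
            · exact hji h'
            · exact hmem h')]
    · rw [if_neg (fun h => hjl h.2), if_neg (fun h => hjl h.2),
        List.getD_eq_default _ _ (by rw [List.length_set]; omega),
        List.getD_eq_default _ _ (by omega)]

lemma pvFoldlBand (L : List Int) (v : Int → Int) (t : Int) (ht : t = 0 ∨ t = 1)
    (hv : ∀ k ∈ L, v k = -1 ∨ v k = -2) :
    L.foldl (fun t k => PySem.Int.band t (v k)) t =
      if t = 1 ∧ ∀ k ∈ L, v k = -1 then 1 else 0 := by
  induction L generalizing t with
  | nil => rcases ht with rfl | rfl <;> simp
  | cons k L ih =>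
    have hvk := hv k (by simp)
    rw [List.foldl_cons]
    rcases ht with rfl | rfl <;> rcases hvk with h | h <;>
      rw [h] <;>
      simp only [(by decide : PySem.Int.band 0 (-1) = 0), (by decide : PySem.Int.band 0 (-2) = 0),
        (by decide : PySem.Int.band 1 (-1) = 1), (by decide : PySem.Int.band 1 (-2) = 0)] <;>
      rw [ih _ (by tauto) (fun k' hk' => hv k' (by simp [hk']))] <;>
      simp [h]

lemma pvFoldlBor (L : List Int) (v : Int → Int) (t : Int) (ht : t = 0 ∨ t = 1)
    (hv : ∀ k ∈ L, v k = 0 ∨ v k = 1) :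
    L.foldl (fun g k => PySem.Int.bor g (v k)) t =
      if t = 1 ∨ ∃ k ∈ L, v k = 1 then 1 else 0 := by
  induction L generalizing t with
  | nil => rcases ht with rfl | rfl <;> simp
  | cons k L ih =>
    have hvk := hv k (by simp)
    rw [List.foldl_cons]
    rcases ht with rfl | rfl <;> rcases hvk with h | h <;>
      rw [h] <;>
      simp only [(by decide : PySem.Int.bor 0 0 = 0), (by decide : PySem.Int.bor 0 1 = 1),
        (by decide : PySem.Int.bor 1 0 = 1), (by decide : PySem.Int.bor 1 1 = 1)] <;>
      rw [ih _ (by tauto) (fun k' hk' => hv k' (by simp [hk']))] <;>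
      simp [h]

lemma pvMod_pow_succ (x N : Nat) : x % 2 ^ (N + 1) = x % 2 ^ N + 2 ^ N * pvBit x N := by
  rw [pow_succ, Nat.mod_mul, pvBit]

lemma pvExists_iff_mod_lt (x y N : Nat) :
    (∃ j < N, pvBit x j = 1 ∧ pvBit y j = 0 ∧
        ∀ k < N, j < k → pvBit x k = pvBit y k) ↔ y % 2 ^ N < x % 2 ^ N := by
  induction N with
  | zero => simp [Nat.mod_one]
  | succ N ih =>
    have hx : x % 2 ^ N < 2 ^ N := Nat.mod_lt _ (Nat.two_pow_pos N)
    have hy : y % 2 ^ N < 2 ^ N := Nat.mod_lt _ (Nat.two_pow_pos N)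
    have hbx := pvBit_lt_two x N
    have hby := pvBit_lt_two y N
    have key : (∃ j < N + 1, pvBit x j = 1 ∧ pvBit y j = 0 ∧
        ∀ k < N + 1, j < k → pvBit x k = pvBit y k) ↔
        ((pvBit x N = 1 ∧ pvBit y N = 0) ∨
         (pvBit x N = pvBit y N ∧ ∃ j < N, pvBit x j = 1 ∧ pvBit y j = 0 ∧
            ∀ k < N, j < k → pvBit x k = pvBit y k)) := by
      constructor
      · rintro ⟨j, hj, h1, h0, hk⟩
        rcases Nat.lt_succ_iff_lt_or_eq.mp hj with hjN | rfl
        · right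
          exact ⟨hk N (Nat.lt_succ_self N) hjN, j, hjN, h1, h0,
            fun k hk2 hk1 => hk k (Nat.lt_succ_of_lt hk2) hk1⟩
        · left; exact ⟨h1, h0⟩
      · rintro (⟨h1, h0⟩ | ⟨heq, j, hj, h1, h0, hk⟩)
        · exact ⟨N, Nat.lt_succ_self N, h1, h0, fun k hk2 hk1 => by omega⟩
        · refine ⟨j, Nat.lt_succ_of_lt hj, h1, h0, fun k hk2 hk1 => ?_⟩
          rcases Nat.lt_succ_iff_lt_or_eq.mp hk2 with h | rfl
          · exact hk k h hk1
          · exact heq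
    rw [key, ih, pvMod_pow_succ, pvMod_pow_succ]
    interval_cases hbxv : pvBit x N <;> interval_cases hbyv : pvBit y N <;> simp <;> omega

-- XNOR of two bits as Python ints: value set and meaning
lemma pvXnor_val (u v : Nat) (hu : u < 2) (hv : v < 2) :
    (Int.not (PySem.Int.bxor (u : Int) (v : Int)) = -1 ∨
     Int.not (PySem.Int.bxor (u : Int) (v : Int)) = -2) ∧
    (Int.not (PySem.Int.bxor (u : Int) (v : Int)) = -1 ↔ u = v) := by
  have hu' : u = 0 ∨ u = 1 := by omega
  have hv' : v = 0 ∨ v = 1 := by omega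
  rcases hu' with rfl | rfl <;> rcases hv' with rfl | rfl <;>
    exact ⟨by decide, by decide⟩

-- temp & a[i] & ~b[i] as Python ints: value set and meaning
lemma pvG_val (t : Int) (u v : Nat) (ht : t = 0 ∨ t = 1) (hu : u < 2) (hv : v < 2) :
    (PySem.Int.band (PySem.Int.band t (u : Int)) (Int.not (v : Int)) = 0 ∨
     PySem.Int.band (PySem.Int.band t (u : Int)) (Int.not (v : Int)) = 1) ∧
    (PySem.Int.band (PySem.Int.band t (u : Int)) (Int.not (v : Int)) = 1 ↔
      t = 1 ∧ u = 1 ∧ v = 0) := by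
  have hu' : u = 0 ∨ u = 1 := by omega
  have hv' : v = 0 ∨ v = 1 := by omega
  rcases ht with rfl | rfl <;> rcases hu' with rfl | rfl <;> rcases hv' with rfl | rfl <;>
    exact ⟨by decide, by decide⟩

-- characterization of the whole bit-table computation of A
lemma pvCore (n : Int) (la lb E G : List Int) (A B : Nat → Nat) (N : Nat)
    (hN : (N : Int) = n) (hNpos : 0 < N)
    (hA : ∀ j : Nat, la.getD j 0 = (A j : Int)) (hB : ∀ j : Nat, lb.getD j 0 = (B j : Int))
    (hA2 : ∀ j, A j < 2) (hB2 : ∀ j, B j < 2)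
    (hEdef : E = (PySem.List.pyRange 1 n 1).foldl
      (fun e i => e.set i.toNat (Int.not (PySem.Int.bxor (la.getD i.toNat 0) (lb.getD i.toNat 0))))
      (List.replicate n.toNat 0))
    (hGdef : G = (PySem.List.pyRange 0 n 1).foldl
      (fun g2 i => g2.set i.toNat (PySem.Int.band (PySem.Int.band
        ((PySem.List.pyRange (i + 1) n 1).foldl
          (fun t k => PySem.Int.band t (E.getD k.toNat 0)) 1)
        (la.getD i.toNat 0)) (Int.not (lb.getD i.toNat 0))))
      (List.replicate n.toNat 0)) :
    (PySem.Int.band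
        ((PySem.List.pyRange 0 n 1).foldl (fun gr i => PySem.Int.bor gr (G.getD i.toNat 0)) 0) 1
      == 1)
    = decide (∃ j < N, A j = 1 ∧ B j = 0 ∧ ∀ k < N, j < k → A k = B k) := by
  have hEget : ∀ k : Int, 1 ≤ k → k < n →
      E.getD k.toNat 0 = Int.not (PySem.Int.bxor ((A k.toNat : Nat) : Int) ((B k.toNat : Nat) : Int)) := by
    intro k h1 h2
    have hk : ((k.toNat : Int)) = k := by omega
    rw [hEdef, pvFoldlSet_getD _ _ _ _
      (fun i hi => by have := (PySem.List.mem_pyRange_one.mp hi).1; omega)]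
    rw [if_pos ⟨by rw [hk]; exact PySem.List.mem_pyRange_one.mpr ⟨h1, h2⟩,
      by rw [List.length_replicate]; omega⟩]
    rw [hk, hA, hB]
  have htemp : ∀ i : Int, 0 ≤ i → i < n →
      ((PySem.List.pyRange (i + 1) n 1).foldl (fun t k => PySem.Int.band t (E.getD k.toNat 0)) 1)
        = if (∀ k < N, i.toNat < k → A k = B k) then 1 else 0 := by
    intro i h0 h2
    rw [pvFoldlBand _ _ 1 (Or.inr rfl) (by
      intro k hk
      obtain ⟨hk1, hk2⟩ := PySem.List.mem_pyRange_one.mp hk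
      rw [hEget k (by omega) hk2]
      exact (pvXnor_val _ _ (hA2 _) (hB2 _)).1)]
    refine if_congr ?_ rfl rfl
    simp only [true_and]
    constructor
    · intro h k hk2 hk1
      have hkmem : ((k : Int)) ∈ PySem.List.pyRange (i + 1) n 1 :=
        PySem.List.mem_pyRange_one.mpr ⟨by omega, by omega⟩
      have hv := h _ hkmem
      rw [hEget _ (by omega) (by omega)] at hv
      rw [(by omega : ((k : Int)).toNat = k)] at hv
      exact (pvXnor_val _ _ (hA2 k) (hB2 k)).2.mp hv
    · intro h k hkmem
      obtain ⟨hk1, hk2⟩ := PySem.List.mem_pyRange_one.mp hkmem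
      rw [hEget _ (by omega) hk2]
      exact (pvXnor_val _ _ (hA2 _) (hB2 _)).2.mpr (h k.toNat (by omega) (by omega))
  have hGget : ∀ i : Int, 0 ≤ i → i < n →
      G.getD i.toNat 0 = PySem.Int.band (PySem.Int.band
        (if (∀ k < N, i.toNat < k → A k = B k) then 1 else 0)
        ((A i.toNat : Nat) : Int)) (Int.not ((B i.toNat : Nat) : Int)) := by
    intro i h0 h2
    have hk : ((i.toNat : Int)) = i := by omega
    rw [hGdef, pvFoldlSet_getD _ _ _ _
      (fun k hk' => (PySem.List.mem_pyRange_one.mp hk').1)]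
    rw [if_pos ⟨by rw [hk]; exact PySem.List.mem_pyRange_one.mpr ⟨h0, h2⟩,
      by rw [List.length_replicate]; omega⟩]
    rw [hk, htemp i h0 h2, hA, hB]
  have hifval : ∀ (P : Prop) [Decidable P], (if P then (1:Int) else 0) = 0 ∨ (if P then (1:Int) else 0) = 1 := by
    intro P _; split <;> simp
  rw [pvFoldlBor _ _ 0 (Or.inl rfl) (by
    intro i hi
    obtain ⟨h0, h2⟩ := PySem.List.mem_pyRange_one.mp hi
    rw [hGget i h0 h2]
    exact (pvG_val _ _ _ (hifval _) (hA2 _) (hB2 _)).1)]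
  have hiff : ((0 : Int) = 1 ∨ ∃ i ∈ PySem.List.pyRange 0 n 1, G.getD i.toNat 0 = 1) ↔
      (∃ j < N, A j = 1 ∧ B j = 0 ∧ ∀ k < N, j < k → A k = B k) := by
    constructor
    · rintro (h | ⟨i, hi, hval⟩)
      · exact absurd h (by decide)
      · obtain ⟨h0, h2⟩ := PySem.List.mem_pyRange_one.mp hi
        rw [hGget i h0 h2] at hval
        obtain ⟨hif, hA1, hB0⟩ := (pvG_val _ _ _ (hifval _) (hA2 _) (hB2 _)).2.mp hval
        refine ⟨i.toNat, by omega, hA1, hB0, ?_⟩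
        by_contra hc
        rw [if_neg hc] at hif
        exact absurd hif (by decide)
    · rintro ⟨j, hj, hA1, hB0, hall⟩
      right
      refine ⟨(j : Int), PySem.List.mem_pyRange_one.mpr ⟨by omega, by omega⟩, ?_⟩
      rw [hGget _ (by omega) (by omega)]
      refine (pvG_val _ _ _ (hifval _) (hA2 _) (hB2 _)).2.mpr
        ⟨?_, by rw [(by omega : (((j:Int)).toNat) = j)]; exact hA1,
          by rw [(by omega : (((j:Int)).toNat) = j)]; exact hB0⟩
      rw [if_pos (by
        rw [(by omega : (((j:Int)).toNat) = j)]
        exact fun k hk2 hk1 => hall k hk2 hk1)]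
  rw [if_congr hiff rfl rfl]
  by_cases hQ : (∃ j < N, A j = 1 ∧ B j = 0 ∧ ∀ k < N, j < k → A k = B k)
  · rw [if_pos hQ, decide_eq_true hQ]
    decide
  · rw [if_neg hQ, decide_eq_false hQ]
    decide

-- ===== VERDICT (by name: the statement is the Claim_ definition above) =====
theorem n_edc_spec : Claim_equal_n_edc := by
  intro a b n _ hP
  have hP' : 0 ≤ a ∧ 0 ≤ b ∧ -2 ≤ n := hP
  obtain ⟨ha, hb, hn2⟩ := hP'
  show n_edc a b n = n_edc_alt a b n
  by_cases hn : n ≤ 0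
  · simp only [n_edc, n_edc_alt,
      PySem.List.pyRange_one_eq_nil (show n ≤ (1 : Int) by omega),
      PySem.List.pyRange_one_eq_nil (show n ≤ (0 : Int) by omega),
      List.foldl_nil, if_pos hn]
    decide
  · rw [not_le] at hn
    have hN : ((n.toNat : Int)) = n := by omega
    have hchar : n_edc a b n = decide (∃ j < n.toNat, pvBit a.toNat j = 1 ∧ pvBit b.toNat j = 0 ∧
        ∀ k < n.toNat, j < k → pvBit a.toNat k = pvBit b.toNat k) := by
      exact pvCore n (pvFormatBits a (n + 2)) (pvFormatBits b (n + 2)) _ _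
        (pvBit a.toNat) (pvBit b.toNat) n.toNat hN (by omega)
        (fun j => pvFormatBits_getD a (n + 2) j) (fun j => pvFormatBits_getD b (n + 2) j)
        (fun j => pvBit_lt_two _ j) (fun j => pvBit_lt_two _ j) rfl rfl
    have halt : n_edc_alt a b n = decide (b.toNat % 2 ^ n.toNat < a.toNat % 2 ^ n.toNat) := by
      unfold n_edc_alt
      rw [if_neg (by omega)]
      have hsh : (1 <<< n.toNat : Nat) = 2 ^ n.toNat := Nat.one_shiftLeft n.toNat
      have h1 : PySem.Int.mod a ((1 <<< n.toNat : Nat) : Int) = ((a.toNat % 2 ^ n.toNat : Nat) : Int) := by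
        conv_lhs => rw [← Int.toNat_of_nonneg ha]
        rw [PySem.Int.mod_natCast, hsh]
      have h2 : PySem.Int.mod b ((1 <<< n.toNat : Nat) : Int) = ((b.toNat % 2 ^ n.toNat : Nat) : Int) := by
        conv_lhs => rw [← Int.toNat_of_nonneg hb]
        rw [PySem.Int.mod_natCast, hsh]
      simp only [h1, h2]
      exact decide_eq_decide.mpr (by exact_mod_cast Iff.rfl)
    rw [hchar, halt]
    exact decide_eq_decide.mpr (pvExists_iff_mod_lt a.toNat b.toNat n.toNat)
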